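-- pv_equiv track=rewrite | github.com/maartenpt/pando | scripts/psd_to_pando_vrt.py | tokenize_psd
-- ===== SOURCE A (Python) =====
-- from typing import List, Tuple, Union
--
-- def tokenize_psd(text: str) -> List[str]:
--     """Split PSD into '(', ')', and atoms (no whitespace inside atoms)."""
--     out: List[str] = []
--     i = 0
--     n = len(text)
--     while i < n:
--         c = text[i]
--         if c.isspace():
--             i += 1
--             continue
--         if c in "()":
--             out.append(c)
--             i += 1
--             continue
--         j = i
--         while j < n and not text[j].isspace() and text[j] not in "()":
--             j += 1
--         out.append(text[i:j])
--         i = j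
--     return out
-- ===== SOURCE B (Python) =====
-- from typing import List
--
-- def tokenize_psd(text: str) -> List[str]:
--     """Split PSD into '(', ')', and atoms (no whitespace inside atoms)."""
--     return text.replace("(", " ( ").replace(")", " ) ").split()
-- ===== Notes on version B (the rewrite author's own statement) =====
-- stated objective: idiomatic
-- what changed: Replaces the explicit index-walk scanner with two string replacements that pad parentheses with spaces followed by a single whitespace split.
import Mathlib
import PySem

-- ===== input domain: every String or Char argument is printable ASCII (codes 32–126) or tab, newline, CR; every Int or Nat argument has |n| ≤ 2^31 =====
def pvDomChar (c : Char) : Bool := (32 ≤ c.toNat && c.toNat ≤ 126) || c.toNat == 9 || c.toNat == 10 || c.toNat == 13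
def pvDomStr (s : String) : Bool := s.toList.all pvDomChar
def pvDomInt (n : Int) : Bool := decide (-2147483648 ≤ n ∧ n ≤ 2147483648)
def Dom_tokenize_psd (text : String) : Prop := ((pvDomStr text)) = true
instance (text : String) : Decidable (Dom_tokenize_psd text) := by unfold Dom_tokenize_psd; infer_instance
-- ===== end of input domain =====

-- B replaces A's explicit index-walk scanner with the idiomatic replace/replace/split one-liner; same cost class.

-- ===== PORT A =====
-- inner while loop of A: scan the atom starting here (chars until whitespace or a paren)
def pvTakeAtom : List Char → List Char × List Char
  | [] => ([], [])
  | c :: rest =>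
    if PySem.Chars.isspace c || c == '(' || c == ')' then ([], c :: rest)
    else
      let p := pvTakeAtom rest
      (c :: p.1, p.2)

theorem pvTakeAtom_snd_length : ∀ l : List Char, (pvTakeAtom l).2.length ≤ l.length := by
  intro l
  induction l with
  | nil => simp [pvTakeAtom]
  | cons c rest ih =>
    by_cases h : (PySem.Chars.isspace c || c == '(' || c == ')') = true
    · simp [pvTakeAtom, h]
    · simp [pvTakeAtom, h]; omega

-- outer while loop of A (atoms collected as List Char, turned into Strings by the wrapper)
def pvTokA : List Char → List (List Char)
  | [] => []
  | c :: rest =>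
    if PySem.Chars.isspace c then pvTokA rest
    else if c == '(' || c == ')' then [c] :: pvTokA rest
    else
      let p := pvTakeAtom (c :: rest)
      p.1 :: pvTokA p.2
termination_by l => l.length
decreasing_by
  · simp
  · simp
  · simp only [pvTakeAtom]
    simp_all
    have := pvTakeAtom_snd_length rest
    omega

def tokenize_psd (text : String) : List String :=
  (pvTokA text.toList).map String.ofList

-- ===== PORT B =====
def tokenize_psd_alt (text : String) : List String :=
  PySem.Str.split₀ (PySem.Str.replace (PySem.Str.replace text "(" " ( ") ")" " ) ")

-- ===== PRECONDITION & SPEC =====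
def Spec_tokenize_psd (text : String) (out : List String) : Prop := out = tokenize_psd_alt text
instance (text : String) (out : List String) : Decidable (Spec_tokenize_psd text out) := by unfold Spec_tokenize_psd; infer_instance

-- ===== CLAIM (what is proved, stated in full; the proofs are below) =====
def Claim_equal_tokenize_psd : Prop := ∀ (text : String), Dom_tokenize_psd text → Spec_tokenize_psd text (tokenize_psd text)

-- ===== LEMMAS AND PROOFS =====

-- single-char str.replace is a flatMap
theorem pvReplaceGo_single (o : Char) (new : List Char) :
    ∀ (fuel : Nat) (s acc : List Char), s.length ≤ fuel →
      PySem.Chars.replace.go [o] new fuel s acc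
        = acc.reverse ++ s.flatMap (fun c => if c = o then new else [c]) := by
  intro fuel
  induction fuel with
  | zero =>
    intro s acc h
    have : s = [] := List.eq_nil_of_length_eq_zero (Nat.le_zero.mp h)
    subst this
    simp [PySem.Chars.replace.go]
  | succ n ih =>
    intro s acc h
    cases s with
    | nil => simp [PySem.Chars.replace.go]
    | cons c t =>
      by_cases hc : c = o
      · subst hc
        simp only [PySem.Chars.replace.go, List.isPrefixOf, beq_self_eq_true,
          Bool.and_self, List.length_cons, List.length_nil, List.drop_succ_cons,
          List.drop_zero, if_true]
        rw [ih t (new.reverse ++ acc) (by simp at h ⊢; omega)]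
        simp
      · have hpre : List.isPrefixOf [o] (c :: t) = false := by
          simp [List.isPrefixOf]; exact fun h' => absurd h'.symm hc
        simp only [PySem.Chars.replace.go, hpre, Bool.false_eq_true, if_false]
        rw [ih t (c :: acc) (by simp at h ⊢; omega)]
        simp [hc]

theorem pvReplace_single (o : Char) (new s : List Char) :
    PySem.Chars.replace s [o] new = s.flatMap (fun c => if c = o then new else [c]) := by
  simp only [PySem.Chars.replace, List.isEmpty_cons, Bool.false_eq_true, if_false]
  exact pvReplaceGo_single o new s.length s [] (le_refl _)

-- the combined effect of the two replacements
def pvExpand (c : Char) : List Char :=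
  if c = '(' then [' ', '(', ' '] else if c = ')' then [' ', ')', ' '] else [c]

theorem pvRewrite_eq (s : List Char) :
    PySem.Chars.replace (PySem.Chars.replace s ['('] [' ', '(', ' ']) [')'] [' ', ')', ' ']
      = s.flatMap pvExpand := by
  rw [pvReplace_single, pvReplace_single, List.flatMap_assoc]
  apply List.flatMap_congr
  intro c _
  by_cases h1 : c = '('
  · subst h1; simp [pvExpand]
  · by_cases h2 : c = ')'
    · subst h2; simp [pvExpand]
    · simp [pvExpand, h1, h2]

-- whitespace characters are not parentheses
theorem pvSpace_not_paren {c : Char} (h : PySem.Chars.isspace c = true) :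
    c ≠ '(' ∧ c ≠ ')' := by
  constructor <;> rintro rfl <;> simp [PySem.Chars.isspace] at h

theorem pvExpand_of_not_paren {c : Char} (h1 : c ≠ '(') (h2 : c ≠ ')') :
    pvExpand c = [c] := by simp [pvExpand, h1, h2]

-- split₀.go swallows a maximal atom prefix into cur
theorem pvGo_atom : ∀ (cs cur : List Char) (accs : List (List Char)),
    PySem.Chars.split₀.go (cs.flatMap pvExpand) cur accs
      = PySem.Chars.split₀.go ((pvTakeAtom cs).2.flatMap pvExpand)
          ((pvTakeAtom cs).1.reverse ++ cur) accs := by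
  intro cs
  induction cs with
  | nil => intro cur accs; simp [pvTakeAtom]
  | cons c t ih =>
    intro cur accs
    by_cases hstop : (PySem.Chars.isspace c || c == '(' || c == ')') = true
    · simp [pvTakeAtom, hstop]
    · have hs : PySem.Chars.isspace c = false := by simp_all
      have h1 : c ≠ '(' := by simp_all
      have h2 : c ≠ ')' := by simp_all
      simp only [pvTakeAtom, hstop, Bool.false_eq_true, if_false]
      rw [List.flatMap_cons, pvExpand_of_not_paren h1 h2]
      simp only [List.singleton_append, PySem.Chars.split₀.go, hs, Bool.false_eq_true, if_false]
      rw [ih (c :: cur) accs]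
      simp

-- when takeAtom stops early, it stops at a stop character
theorem pvTakeAtom_snd_stop : ∀ (l : List Char) {d : Char} {r : List Char},
    (pvTakeAtom l).2 = d :: r →
    (PySem.Chars.isspace d || d == '(' || d == ')') = true := by
  intro l
  induction l with
  | nil => intro d r h; simp [pvTakeAtom] at h
  | cons c t ih =>
    intro d r h
    by_cases hstop : (PySem.Chars.isspace c || c == '(' || c == ')') = true
    · simp [pvTakeAtom, hstop] at h
      obtain ⟨rfl, -⟩ := h
      exact hstop
    · simp [pvTakeAtom, hstop] at h
      exact ih h

theorem pvIsspace_space : PySem.Chars.isspace ' ' = true := by decide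


-- step lemmas for split₀.go
theorem pvGo_nil_nil (accs : List (List Char)) :
    PySem.Chars.split₀.go [] [] accs = accs.reverse := by
  simp [PySem.Chars.split₀.go]

theorem pvGo_nil_flush (cur : List Char) (accs : List (List Char)) (h : cur ≠ []) :
    PySem.Chars.split₀.go [] cur accs = accs.reverse ++ [cur.reverse] := by
  cases cur with
  | nil => exact absurd rfl h
  | cons x xs => simp [PySem.Chars.split₀.go]

theorem pvGo_space (c : Char) (l : List Char) (accs : List (List Char))
    (h : PySem.Chars.isspace c = true) :
    PySem.Chars.split₀.go (c :: l) [] accs = PySem.Chars.split₀.go l [] accs := by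
  simp [PySem.Chars.split₀.go, h]

theorem pvGo_space_flush (c : Char) (l cur : List Char) (accs : List (List Char))
    (h : PySem.Chars.isspace c = true) (hcur : cur ≠ []) :
    PySem.Chars.split₀.go (c :: l) cur accs
      = PySem.Chars.split₀.go l [] (cur.reverse :: accs) := by
  cases cur with
  | nil => exact absurd rfl hcur
  | cons x xs => simp [PySem.Chars.split₀.go, h]

theorem pvGo_nonspace (c : Char) (l cur : List Char) (accs : List (List Char))
    (h : PySem.Chars.isspace c = false) :
    PySem.Chars.split₀.go (c :: l) cur accs = PySem.Chars.split₀.go l (c :: cur) accs := by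
  simp [PySem.Chars.split₀.go, h]

-- equation lemmas for pvTokA (well-founded recursion)
theorem pvTokA_nil : pvTokA [] = [] := by rw [pvTokA.eq_def]

theorem pvTokA_space (c : Char) (rest : List Char) (h : PySem.Chars.isspace c = true) :
    pvTokA (c :: rest) = pvTokA rest := by
  rw [pvTokA.eq_def]; simp [h]

theorem pvTokA_paren (c : Char) (rest : List Char) (hs : PySem.Chars.isspace c = false)
    (hp : (c == '(' || c == ')') = true) :
    pvTokA (c :: rest) = [c] :: pvTokA rest := by
  rw [pvTokA.eq_def]; simp_all

theorem pvTokA_atom (c : Char) (rest : List Char) (hs : PySem.Chars.isspace c = false)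
    (hp : (c == '(' || c == ')') = false) :
    pvTokA (c :: rest) = (c :: (pvTakeAtom rest).1) :: pvTokA (pvTakeAtom rest).2 := by
  rw [pvTokA.eq_def]
  have hstop : (PySem.Chars.isspace c || c == '(' || c == ')') = false := by simp_all
  simp_all [pvTakeAtom]

-- main loop invariant: split₀ of the expanded string computes A's token list
theorem pvGo_main : ∀ (n : Nat) (cs : List Char) (accs : List (List Char)),
    cs.length ≤ n →
    PySem.Chars.split₀.go (cs.flatMap pvExpand) [] accs = accs.reverse ++ pvTokA cs := by
  intro n
  induction n with
  | zero =>
    intro cs accs h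
    have : cs = [] := List.eq_nil_of_length_eq_zero (Nat.le_zero.mp h)
    subst this
    rw [List.flatMap_nil, pvGo_nil_nil, pvTokA_nil, List.append_nil]
  | succ n ih =>
    intro cs accs h
    cases cs with
    | nil => rw [List.flatMap_nil, pvGo_nil_nil, pvTokA_nil, List.append_nil]
    | cons c rest =>
      have hrest : rest.length ≤ n := by simp at h; omega
      by_cases hs : PySem.Chars.isspace c = true
      · obtain ⟨h1, h2⟩ := pvSpace_not_paren hs
        rw [List.flatMap_cons, pvExpand_of_not_paren h1 h2, List.singleton_append,
          pvGo_space c _ accs hs, ih rest accs hrest, pvTokA_space c rest hs]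
      · have hs' : PySem.Chars.isspace c = false := by simp_all
        by_cases hp : (c == '(' || c == ')') = true
        · have he : pvExpand c = [' ', c, ' '] := by
            rcases Bool.or_eq_true_iff.mp hp with h' | h' <;> simp_all [pvExpand]
          rw [List.flatMap_cons, he]
          show PySem.Chars.split₀.go (' ' :: c :: ' ' :: rest.flatMap pvExpand) [] accs = _
          rw [pvGo_space _ _ _ pvIsspace_space,
            pvGo_nonspace c _ [] accs hs',
            pvGo_space_flush ' ' _ [c] accs pvIsspace_space (by simp),
            ih rest _ hrest, pvTokA_paren c rest hs' hp]
          simp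
        · -- atom case
          have hp' : (c == '(' || c == ')') = false := by simp_all
          have hstop : (PySem.Chars.isspace c || c == '(' || c == ')') = false := by
            simp_all
          have ht1 : (pvTakeAtom (c :: rest)).1 = c :: (pvTakeAtom rest).1 := by
            simp [pvTakeAtom, hstop]
          have ht2 : (pvTakeAtom (c :: rest)).2 = (pvTakeAtom rest).2 := by
            simp [pvTakeAtom, hstop]
          rw [pvGo_atom (c :: rest) [] accs, ht1, ht2, List.append_nil,
            pvTokA_atom c rest hs' hp']
          have hlr := pvTakeAtom_snd_length rest
          cases hr : (pvTakeAtom rest).2 with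
          | nil =>
            rw [List.flatMap_nil, pvGo_nil_flush _ accs (by simp), pvTokA_nil]
            simp
          | cons d r' =>
            have hd := pvTakeAtom_snd_stop rest hr
            have hr' : r'.length ≤ n := by
              rw [hr] at hlr; simp at hlr; omega
            by_cases hds : PySem.Chars.isspace d = true
            · obtain ⟨hd1, hd2⟩ := pvSpace_not_paren hds
              rw [List.flatMap_cons, pvExpand_of_not_paren hd1 hd2, List.singleton_append,
                pvGo_space_flush d _ _ accs hds (by simp), ih r' _ hr',
                pvTokA_space d r' hds]
              simp
            · have hds' : PySem.Chars.isspace d = false := by simp_all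
              have hdp : (d == '(' || d == ')') = true := by simp_all
              have hde : pvExpand d = [' ', d, ' '] := by
                rcases Bool.or_eq_true_iff.mp hdp with h' | h' <;> simp_all [pvExpand]
              rw [List.flatMap_cons, hde]
              show PySem.Chars.split₀.go
                (' ' :: d :: ' ' :: r'.flatMap pvExpand) _ accs = _
              rw [pvGo_space_flush ' ' _ _ accs pvIsspace_space (by simp),
                pvGo_nonspace d _ [] _ hds',
                pvGo_space_flush ' ' _ [d] _ pvIsspace_space (by simp),
                ih r' _ hr', pvTokA_paren d r' hds' hdp]
              simp

-- ===== VERDICT (by name: the statement is the Claim_ definition above) =====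
theorem tokenize_psd_spec : Claim_equal_tokenize_psd := by
  intro text _
  unfold Spec_tokenize_psd tokenize_psd tokenize_psd_alt
  simp only [PySem.Str.replace, PySem.Str.split₀, String.toList_ofList]
  have e1 : "(".toList = ['('] := rfl
  have e2 : ")".toList = [')'] := rfl
  have e3 : " ( ".toList = [' ', '(', ' '] := rfl
  have e4 : " ) ".toList = [' ', ')', ' '] := rfl
  rw [e1, e2, e3, e4, pvRewrite_eq, PySem.Chars.split₀,
    pvGo_main text.toList.length text.toList [] (le_refl _)]
  simp
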